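-- pv_equiv track=rewrite | github.com/fenella0401/Hierarchical-Basket-Preference-Learning | HBP/utils/data_helpers.py | sort_batch_of_lists
-- ===== SOURCE A (Python) =====
-- def sort_batch_of_lists(uids, batch_of_lists, lens, batch_of_lists2, batch_of_lists3):
--     """Sort batch of lists according to len(list). Descending"""
--     sorted_idx = [i[0] for i in sorted(enumerate(lens), key=lambda x: x[1], reverse=True)]
--     uids = [uids[i] for i in sorted_idx]
--     lens = [lens[i] for i in sorted_idx]
--     batch_of_lists = [batch_of_lists[i] for i in sorted_idx]
--     batch_of_lists2 = [batch_of_lists2[i] for i in sorted_idx]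
--     batch_of_lists3 = [batch_of_lists3[i] for i in sorted_idx]
--     return uids, batch_of_lists, lens, batch_of_lists2, batch_of_lists3
-- ===== SOURCE B (Python) =====
-- def sort_batch_of_lists(uids, batch_of_lists, lens, batch_of_lists2, batch_of_lists3):
--     """Sort batch of lists according to len(list). Descending"""
--     records = sorted(zip(uids, batch_of_lists, lens, batch_of_lists2, batch_of_lists3),
--                      key=lambda t: t[2], reverse=True)
--     if not records:
--         return [], [], [], [], []
--     u, b, l, b2, b3 = zip(*records)
--     return list(u), list(b), list(l), list(b2), list(b3)
-- ===== Notes on version B (the rewrite author's own statement) =====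
-- stated objective: idiomatic
-- what changed: Instead of computing an index permutation from sorted(enumerate(lens)) and then gathering each of the five lists by index, B zips the five lists into records, sorts the records once (stable, keyed on the length field, descending) and unzips them back.
import Mathlib
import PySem

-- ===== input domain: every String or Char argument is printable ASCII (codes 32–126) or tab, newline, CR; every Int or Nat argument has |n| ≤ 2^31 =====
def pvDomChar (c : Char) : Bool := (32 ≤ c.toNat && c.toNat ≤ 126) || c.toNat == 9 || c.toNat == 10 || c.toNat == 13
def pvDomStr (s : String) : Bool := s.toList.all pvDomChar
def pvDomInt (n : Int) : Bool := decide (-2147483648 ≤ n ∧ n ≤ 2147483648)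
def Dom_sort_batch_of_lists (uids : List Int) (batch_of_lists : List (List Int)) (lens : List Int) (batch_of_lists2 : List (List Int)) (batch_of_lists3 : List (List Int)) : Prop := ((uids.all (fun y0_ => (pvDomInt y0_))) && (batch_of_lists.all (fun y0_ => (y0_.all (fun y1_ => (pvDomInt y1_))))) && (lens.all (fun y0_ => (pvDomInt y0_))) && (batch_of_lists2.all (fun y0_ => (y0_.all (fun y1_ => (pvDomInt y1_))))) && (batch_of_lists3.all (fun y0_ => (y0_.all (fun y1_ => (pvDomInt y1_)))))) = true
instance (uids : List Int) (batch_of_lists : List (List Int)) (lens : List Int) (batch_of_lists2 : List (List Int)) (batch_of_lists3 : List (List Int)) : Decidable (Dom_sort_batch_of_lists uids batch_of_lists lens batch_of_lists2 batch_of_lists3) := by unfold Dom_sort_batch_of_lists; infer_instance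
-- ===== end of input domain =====

-- B replaces A's index-permutation-then-gather with zip / stable sort on the length field / unzip (idiomatic; return value only).

-- ===== PORT A =====
def sort_batch_of_lists (uids : List Int) (batch_of_lists : List (List Int)) (lens : List Int) (batch_of_lists2 : List (List Int)) (batch_of_lists3 : List (List Int)) : List Int × List (List Int) × List Int × List (List Int) × List (List Int) :=
  let sorted_idx : List Int :=
    (PySem.List.sorted (PySem.List.enumerate lens) (fun x => x.2) true).map (fun i => i.1)
  let uids' := sorted_idx.map (fun i => PySem.List.pyGetD uids i 0)
  let lens' := sorted_idx.map (fun i => PySem.List.pyGetD lens i 0)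
  let b1' := sorted_idx.map (fun i => PySem.List.pyGetD batch_of_lists i [])
  let b2' := sorted_idx.map (fun i => PySem.List.pyGetD batch_of_lists2 i [])
  let b3' := sorted_idx.map (fun i => PySem.List.pyGetD batch_of_lists3 i [])
  (uids', b1', lens', b2', b3')

-- ===== PORT B =====
def sort_batch_of_lists_alt (uids : List Int) (batch_of_lists : List (List Int)) (lens : List Int) (batch_of_lists2 : List (List Int)) (batch_of_lists3 : List (List Int)) : List Int × List (List Int) × List Int × List (List Int) × List (List Int) :=
  let records := PySem.List.sorted
    (uids.zip (batch_of_lists.zip (lens.zip (batch_of_lists2.zip batch_of_lists3))))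
    (fun t => t.2.2.1) true
  if records.isEmpty then ([], [], [], [], [])
  else (records.map (fun t => t.1), records.map (fun t => t.2.1), records.map (fun t => t.2.2.1),
        records.map (fun t => t.2.2.2.1), records.map (fun t => t.2.2.2.2))

-- ===== PRECONDITION & SPEC =====
-- Pre_ excludes exactly the inputs on which A raises IndexError: some list shorter than lens.
def Pre_sort_batch_of_lists (uids : List Int) (batch_of_lists : List (List Int)) (lens : List Int) (batch_of_lists2 : List (List Int)) (batch_of_lists3 : List (List Int)) : Prop :=
  lens.length ≤ uids.length ∧ lens.length ≤ batch_of_lists.length ∧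
  lens.length ≤ batch_of_lists2.length ∧ lens.length ≤ batch_of_lists3.length
instance (uids : List Int) (batch_of_lists : List (List Int)) (lens : List Int) (batch_of_lists2 : List (List Int)) (batch_of_lists3 : List (List Int)) : Decidable (Pre_sort_batch_of_lists uids batch_of_lists lens batch_of_lists2 batch_of_lists3) := by unfold Pre_sort_batch_of_lists; infer_instance

def pvWitness_sort_batch_of_lists : List Int × List (List Int) × List Int × List (List Int) × List (List Int) :=
  ([1, 2, 3], [[5], [6, 7], []], [1, 2, 0], [[8], [], [9]], [[], [1], [2]])

def Spec_sort_batch_of_lists (uids : List Int) (batch_of_lists : List (List Int)) (lens : List Int) (batch_of_lists2 : List (List Int)) (batch_of_lists3 : List (List Int)) (out : List Int × List (List Int) × List Int × List (List Int) × List (List Int)) : Prop := out = sort_batch_of_lists_alt uids batch_of_lists lens batch_of_lists2 batch_of_lists3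
instance (uids : List Int) (batch_of_lists : List (List Int)) (lens : List Int) (batch_of_lists2 : List (List Int)) (batch_of_lists3 : List (List Int)) (out : List Int × List (List Int) × List Int × List (List Int) × List (List Int)) : Decidable (Spec_sort_batch_of_lists uids batch_of_lists lens batch_of_lists2 batch_of_lists3 out) := by unfold Spec_sort_batch_of_lists; infer_instance

-- ===== CLAIM (what is proved, stated in full; the proofs are below) =====
def Claim_equal_sort_batch_of_lists : Prop := ∀ (uids : List Int) (batch_of_lists : List (List Int)) (lens : List Int) (batch_of_lists2 : List (List Int)) (batch_of_lists3 : List (List Int)), Dom_sort_batch_of_lists uids batch_of_lists lens batch_of_lists2 batch_of_lists3 → Pre_sort_batch_of_lists uids batch_of_lists lens batch_of_lists2 batch_of_lists3 → Spec_sort_batch_of_lists uids batch_of_lists lens batch_of_lists2 batch_of_lists3 (sort_batch_of_lists uids batch_of_lists lens batch_of_lists2 batch_of_lists3)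
-- ===== LEMMAS AND PROOFS =====

theorem pv_insertBy_map {A B : Type} (g : A → B) (ba : A → A → Bool) (bb : B → B → Bool)
    (h : ∀ a b, bb (g a) (g b) = ba a b) (x : A) (ys : List A) :
    PySem.List.insertBy bb (g x) (ys.map g) = (PySem.List.insertBy ba x ys).map g := by
  induction ys with
  | nil => simp [PySem.List.insertBy]
  | cons y ys ih =>
    simp only [List.map_cons, PySem.List.insertBy, h]
    by_cases hc : ba x y
    · simp [hc]
    · simp [hc, ih]

theorem pv_foldl_insertBy_map {A B : Type} (g : A → B) (ba : A → A → Bool) (bb : B → B → Bool)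
    (h : ∀ a b, bb (g a) (g b) = ba a b) (xs : List A) :
    ∀ acc : List A,
      (xs.map g).foldl (fun acc x => PySem.List.insertBy bb x acc) (acc.map g)
        = (xs.foldl (fun acc x => PySem.List.insertBy ba x acc) acc).map g := by
  induction xs with
  | nil => intro acc; simp
  | cons x xs ih =>
    intro acc
    simp only [List.map_cons, List.foldl_cons]
    rw [pv_insertBy_map g ba bb h x acc]
    exact ih (PySem.List.insertBy ba x acc)

theorem pv_sorted_map {A B K : Type} [LT K] [DecidableLT K] (g : A → B) (xs : List A) (key : B → K) :
    PySem.List.sorted (xs.map g) key true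
      = (PySem.List.sorted xs (fun a => key (g a)) true).map g := by
  rw [PySem.List.sorted_rev_eq_foldl_insertBy, PySem.List.sorted_rev_eq_foldl_insertBy]
  have := pv_foldl_insertBy_map g
    (fun a b => decide (key (g b) < key (g a))) (fun a b => decide (key b < key a))
    (fun a b => rfl) xs []
  simpa using this

theorem pv_enumerate_map {A B : Type} (g : A → B) (xs : List A) :
    ∀ s : Int, PySem.List.enumerate (xs.map g) s
      = (PySem.List.enumerate xs s).map (fun p => (p.1, g p.2)) := by
  induction xs with
  | nil => intro s; simp [PySem.List.enumerate]
  | cons x xs ih =>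
    intro s
    simp [PySem.List.enumerate_cons, ih (s + 1)]

theorem pv_mem_enumerate {A : Type} (xs : List A) :
    ∀ (s : Int) (p : Int × A), p ∈ PySem.List.enumerate xs s →
      ∃ k : Nat, ∃ hk : k < xs.length, p = (s + k, xs[k]) := by
  induction xs with
  | nil => intro s p hp; simp [PySem.List.enumerate] at hp
  | cons x xs ih =>
    intro s p hp
    rw [PySem.List.enumerate_cons] at hp
    rcases List.mem_cons.1 hp with h | h
    · exact ⟨0, by simp, by simp [h]⟩
    · obtain ⟨k, hk, rfl⟩ := ih (s + 1) p h
      refine ⟨k + 1, by simpa using Nat.succ_lt_succ hk, ?_⟩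
      simp only [List.getElem_cons_succ]
      congr 1
      push_cast
      ring

-- ===== VERDICT (by name: the statement is the Claim_ definition above) =====
theorem sort_batch_of_lists_spec : Claim_equal_sort_batch_of_lists := by
  intro uids b1 lens b2 b3 _ hpre
  unfold Pre_sort_batch_of_lists at hpre
  obtain ⟨h1, h2, h3, h4⟩ := hpre
  unfold Spec_sort_batch_of_lists sort_batch_of_lists sort_batch_of_lists_alt
  set Z := uids.zip (b1.zip (lens.zip (b2.zip b3))) with hZ
  have hZlen : Z.length = lens.length := by
    simp only [hZ, List.length_zip]
    omega
  have hlens : lens = Z.map (fun t => t.2.2.1) := by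
    apply List.ext_getElem
    · simp [hZlen]
    · intro k hk1 hk2
      simp [hZ, List.getElem_zip]
  set S := PySem.List.sorted (PySem.List.enumerate Z) (fun p => p.2.2.2.1) true with hS
  have hA : PySem.List.sorted (PySem.List.enumerate lens) (fun x => x.2) true
      = S.map (fun p => (p.1, p.2.2.2.1)) := by
    conv_lhs => rw [hlens]
    rw [pv_enumerate_map (fun t => t.2.2.1) Z 0]
    exact pv_sorted_map (fun p => (p.1, p.2.2.2.1)) (PySem.List.enumerate Z) (fun x => x.2)
  have hrec : PySem.List.sorted Z (fun t => t.2.2.1) true = S.map (fun p => p.2) := by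
    conv_lhs => rw [← PySem.List.map_snd_enumerate Z 0]
    exact pv_sorted_map (fun p => p.2) (PySem.List.enumerate Z) (fun t => t.2.2.1)
  have hmem : ∀ p ∈ S, ∃ k : Nat, ∃ hk : k < Z.length, p = ((k : Int), Z[k]) := by
    intro p hp
    have hp' : p ∈ PySem.List.enumerate Z := (PySem.List.mem_sorted _ _ _ _).1 hp
    obtain ⟨k, hk, rfl⟩ := pv_mem_enumerate Z 0 p hp'
    exact ⟨k, hk, by simp⟩
  have hproj : ∀ k : Nat, ∀ hk : k < Z.length,
      Z[k].1 = uids[k]'(by omega) ∧ Z[k].2.1 = b1[k]'(by omega) ∧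
      Z[k].2.2.1 = lens[k]'(by omega) ∧ Z[k].2.2.2.1 = b2[k]'(by omega) ∧
      Z[k].2.2.2.2 = b3[k]'(by omega) := by
    intro k hk
    simp [hZ, List.getElem_zip]
  have hu : S.map (fun p => PySem.List.pyGetD uids p.1 0) = S.map (fun p => p.2.1) := by
    refine List.map_congr_left (fun p hp => ?_)
    obtain ⟨k, hk, rfl⟩ := hmem p hp
    have hku : k < uids.length := by omega
    simp [PySem.List.pyGetD_natCast, List.getElem?_eq_getElem hku, (hproj k hk).1]
  have hl : S.map (fun p => PySem.List.pyGetD lens p.1 0) = S.map (fun p => p.2.2.2.1) := by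
    refine List.map_congr_left (fun p hp => ?_)
    obtain ⟨k, hk, rfl⟩ := hmem p hp
    have hkl : k < lens.length := by omega
    simp [PySem.List.pyGetD_natCast, List.getElem?_eq_getElem hkl, (hproj k hk).2.2.1]
  have hb1 : S.map (fun p => PySem.List.pyGetD b1 p.1 ([] : List Int)) = S.map (fun p => p.2.2.1) := by
    refine List.map_congr_left (fun p hp => ?_)
    obtain ⟨k, hk, rfl⟩ := hmem p hp
    have hkb : k < b1.length := by omega
    simp [PySem.List.pyGetD_natCast, List.getElem?_eq_getElem hkb, (hproj k hk).2.1]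
  have hb2 : S.map (fun p => PySem.List.pyGetD b2 p.1 ([] : List Int)) = S.map (fun p => p.2.2.2.2.1) := by
    refine List.map_congr_left (fun p hp => ?_)
    obtain ⟨k, hk, rfl⟩ := hmem p hp
    have hkb : k < b2.length := by omega
    simp [PySem.List.pyGetD_natCast, List.getElem?_eq_getElem hkb, (hproj k hk).2.2.2.1]
  have hb3 : S.map (fun p => PySem.List.pyGetD b3 p.1 ([] : List Int)) = S.map (fun p => p.2.2.2.2.2) := by
    refine List.map_congr_left (fun p hp => ?_)
    obtain ⟨k, hk, rfl⟩ := hmem p hp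
    have hkb : k < b3.length := by omega
    simp [PySem.List.pyGetD_natCast, List.getElem?_eq_getElem hkb, (hproj k hk).2.2.2.2]
  simp only [hA, hrec, List.map_map]
  by_cases hSe : S = []
  · simp [hSe]
  · have : ((S.map (fun p => p.2)).isEmpty) = false := by
      simp [List.isEmpty_eq_false_iff, hSe]
    rw [this]
    simp only [Bool.false_eq_true, if_false]
    refine Prod.ext ?_ (Prod.ext ?_ (Prod.ext ?_ (Prod.ext ?_ ?_))) <;> first
      | exact hu.trans rfl
      | exact hb1.trans rfl
      | exact hl.trans rfl
      | exact hb2.trans rfl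
      | exact hb3.trans rfl
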